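-- pv_equiv track=rewrite | github.com/sinamorolgo/void-train | backend/app/core/task_catalog.py | _find_duplicate_values
-- ===== SOURCE A (Python) =====
-- def _find_duplicate_values(values: list[str]) -> list[str]:
--     seen: set[str] = set()
--     duplicated: set[str] = set()
--     for value in values:
--         if value in seen:
--             duplicated.add(value)
--         seen.add(value)
--     return sorted(duplicated)
-- ===== SOURCE B (Python) =====
-- def _find_duplicate_values(values: list[str]) -> list[str]:
--     svals = sorted(values)
--     out: list[str] = []
--     for prev, cur in zip(svals, svals[1:]):
--         if prev == cur and (not out or out[-1] != cur):
--             out.append(cur)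
--     return out
-- ===== Notes on version B (the rewrite author's own statement) =====
-- stated objective: alternative
-- what changed: Replaced A's hash-set detect-during-scan (seen/duplicated sets plus a final sort) by a sort-first algorithm: sort the input, then one adjacent-pair scan over the sorted list that emits each value whose run has length >= 2, deduplicating against the last emitted element, so the output is built already in sorted order with no sets at all.
import Mathlib
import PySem

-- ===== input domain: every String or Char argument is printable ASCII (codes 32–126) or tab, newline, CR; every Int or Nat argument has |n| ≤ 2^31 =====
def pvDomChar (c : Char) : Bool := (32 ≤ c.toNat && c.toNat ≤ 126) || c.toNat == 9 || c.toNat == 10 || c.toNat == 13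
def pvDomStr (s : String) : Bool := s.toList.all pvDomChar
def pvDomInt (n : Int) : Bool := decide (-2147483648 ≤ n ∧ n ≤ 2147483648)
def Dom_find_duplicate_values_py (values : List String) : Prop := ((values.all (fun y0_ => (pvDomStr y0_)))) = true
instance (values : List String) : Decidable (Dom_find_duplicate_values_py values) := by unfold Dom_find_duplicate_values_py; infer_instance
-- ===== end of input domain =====

-- B replaces A's hash-set detect-during-scan + final sort by sort-first, then one adjacent-pair scan emitting run heads (alternative algorithm; same cost).

-- ===== PORT A =====
-- seen/duplicated sets, one pass; duplicated.add on a repeat, then sorted(duplicated)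
def find_duplicate_values_py (values : List String) : List String :=
  let st := values.foldl
    (fun (sd : PySem.Set String × PySem.Set String) v =>
      (PySem.Set.add sd.1 v,
       if PySem.Set.contains sd.1 v then PySem.Set.add sd.2 v else sd.2))
    (PySem.Set.empty, PySem.Set.empty)
  PySem.List.sorted st.2 (fun x => x) false

-- ===== PORT B =====
-- svals = sorted(values); for prev, cur in zip(svals, svals[1:]): emit cur when prev == cur
-- and cur was not just emitted (out[-1] != cur); no sets, output built already sorted
def find_duplicate_values_py_alt (values : List String) : List String :=
  let svals := PySem.List.sorted values (fun x => x) false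
  (svals.zip (PySem.List.slice svals (some 1) none)).foldl
    (fun (out : List String) pc =>
      if pc.1 = pc.2 ∧ (out = [] ∨ out.getLast? ≠ some pc.2) then out ++ [pc.2] else out)
    []

-- ===== PRECONDITION & SPEC =====
def Spec_find_duplicate_values_py (values : List String) (out : List String) : Prop := out = find_duplicate_values_py_alt values
instance (values : List String) (out : List String) : Decidable (Spec_find_duplicate_values_py values out) := by unfold Spec_find_duplicate_values_py; infer_instance

-- ===== CLAIM =====
def Claim_equal_find_duplicate_values_py : Prop := ∀ (values : List String), Dom_find_duplicate_values_py values → Spec_find_duplicate_values_py values (find_duplicate_values_py values)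

-- ===== LEMMAS AND PROOFS =====

-- A's loop: membership in the duplicated set after the fold
lemma loopA_mem (vs : List String) : ∀ (s d : PySem.Set String) (x : String),
    (x ∈ (vs.foldl
      (fun (sd : PySem.Set String × PySem.Set String) v =>
        (PySem.Set.add sd.1 v,
         if PySem.Set.contains sd.1 v then PySem.Set.add sd.2 v else sd.2))
      (s, d)).2) ↔ (x ∈ d ∨ (x ∈ s ∧ x ∈ vs) ∨ 2 ≤ vs.count x) := by
  induction vs with
  | nil => simp
  | cons v rest ih =>
    intro s d x
    simp only [List.foldl_cons, ih]
    have hmemcount : x ∈ rest ↔ 1 ≤ rest.count x :=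
      ⟨fun h => List.count_pos_iff.2 h, fun h => List.count_pos_iff.1 h⟩
    by_cases hx : x = v
    · subst hx
      by_cases hvs : x ∈ s
      · have hc : PySem.Set.contains s x = true := (PySem.Set.contains_iff s x).2 hvs
        simp [PySem.Set.mem_add, hvs]
      · have hc : PySem.Set.contains s x = false := by
          by_contra h
          exact hvs ((PySem.Set.contains_iff s x).1 (by simpa using h))
        simp only [hc, Bool.false_eq_true, if_false, PySem.Set.mem_add, List.mem_cons,
          List.count_cons_self]
        by_cases hdm : x ∈ d
        · simp [hdm]
        · simp only [hdm, false_or, hvs, or_true, true_and, false_and]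
          rw [hmemcount]
          constructor
          · rintro (h | h) <;> omega
          · intro h
            by_cases hr : 1 ≤ rest.count x
            · exact Or.inl hr
            · omega
    · have hif : (x ∈ if PySem.Set.contains s v = true then PySem.Set.add d v else d) ↔ x ∈ d := by
        split
        · rw [PySem.Set.mem_add]; simp [hx]
        · exact Iff.rfl
      rw [hif]
      simp [PySem.Set.mem_add, hx, Ne.symm hx]

-- A's loop preserves Nodup of the duplicated set
lemma loopA_nodup (vs : List String) : ∀ (s d : PySem.Set String), d.Nodup →
    ((vs.foldl
      (fun (sd : PySem.Set String × PySem.Set String) v =>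
        (PySem.Set.add sd.1 v,
         if PySem.Set.contains sd.1 v then PySem.Set.add sd.2 v else sd.2))
      (s, d)).2).Nodup := by
  induction vs with
  | nil => intro s d h; simpa using h
  | cons v rest ih =>
    intro s d h
    apply ih
    split
    · exact PySem.Set.nodup_add _ _ h
    · exact h

-- in a strictly increasing list, getLast is an upper bound
lemma last_ub (l : List String) (h : l ≠ []) (hp : l.Pairwise (· < ·)) :
    ∀ y ∈ l, y ≤ l.getLast h := by
  induction l with
  | nil => simp at h
  | cons a t ih =>
    intro y hy
    rcases List.mem_cons.1 hy with rfl | hyt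
    · match t with
      | [] => simp
      | b :: t' =>
        have : y < (b :: t').getLast (by simp) :=
          (List.pairwise_cons.1 hp).1 _ (List.getLast_mem _)
        rw [List.getLast_cons (by simp)]
        exact this.le
    · have hne : t ≠ [] := by rintro rfl; simp at hyt
      have := ih hne (List.pairwise_cons.1 hp).2 y hyt
      rw [List.getLast_cons hne]
      exact this

-- the adjacent-pair count step
lemma count_cons_ne (x a : String) (l : List String) (h : x ≠ a) :
    (a :: l).count x = l.count x := by
  simp [Ne.symm h]

-- B's scan over the adjacent pairs of a sorted list, with a general accumulator:
-- the result is strictly increasing and contains exactly acc ∪ {x | count x s ≥ 2}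
lemma loopB (s : List String) : ∀ (acc : List String),
    s.Pairwise (· ≤ ·) → acc.Pairwise (· < ·) → (∀ y ∈ acc, ∀ z ∈ s, y ≤ z) →
    (((s.zip s.tail).foldl
        (fun (out : List String) pc =>
          if pc.1 = pc.2 ∧ (out = [] ∨ out.getLast? ≠ some pc.2) then out ++ [pc.2] else out)
        acc).Pairwise (· < ·)
     ∧ ∀ x, (x ∈ (s.zip s.tail).foldl
        (fun (out : List String) pc =>
          if pc.1 = pc.2 ∧ (out = [] ∨ out.getLast? ≠ some pc.2) then out ++ [pc.2] else out)
        acc) ↔ (x ∈ acc ∨ 2 ≤ s.count x)) := by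
  induction s with
  | nil => intro acc _ hacc _; exact ⟨by simpa using hacc, by simp⟩
  | cons a t ih =>
    intro acc hs hacc hle
    match t, hs, hle, ih with
    | [], _, _, _ =>
      refine ⟨by simpa using hacc, fun x => ?_⟩
      simp only [List.tail_cons, List.zip_nil_right, List.foldl_nil]
      constructor
      · exact fun h => Or.inl h
      · rintro (h | h)
        · exact h
        · exfalso
          have : List.count x [a] ≤ 1 := by
            by_cases hxa : x = a
            · subst hxa; simp
            · simp [Ne.symm hxa]
          omega
    | b :: t', hs, hle, ih =>
      have hab : a ≤ b := (List.pairwise_cons.1 hs).1 b (by simp)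
      have hs' : (b :: t').Pairwise (· ≤ ·) := (List.pairwise_cons.1 hs).2
      have hzip : ((a :: b :: t').zip (a :: b :: t').tail)
          = (a, b) :: ((b :: t').zip (b :: t').tail) := by simp
      rw [hzip, List.foldl_cons]
      by_cases heq : a = b
      · by_cases hbranch : acc = [] ∨ acc.getLast? ≠ some b
        · -- emit b
          rw [if_pos ⟨heq, hbranch⟩]
          have hlast : ∀ y ∈ acc, y < b := by
            intro y hy
            have hya : y ≤ b := heq ▸ hle y hy a (by simp)
            rcases lt_or_eq_of_le hya with h | h
            · exact h
            · exfalso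
              have hne : acc ≠ [] := by rintro rfl; simp at hy
              rcases hbranch with h0 | hlq
              · exact hne h0
              · have h1 : acc.getLast hne ≤ b := heq ▸ hle _ (List.getLast_mem hne) a (by simp)
                have h2 : b ≤ acc.getLast hne := h ▸ last_ub acc hne hacc y hy
                apply hlq
                rw [List.getLast?_eq_some_getLast hne]
                exact congrArg some (le_antisymm h1 h2)
          have hacc' : (acc ++ [b]).Pairwise (· < ·) := by
            rw [List.pairwise_append]
            exact ⟨hacc, by simp, by simpa using hlast⟩
          have hle' : ∀ y ∈ acc ++ [b], ∀ z ∈ b :: t', y ≤ z := by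
            intro y hy z hz
            rcases List.mem_append.1 hy with h | h
            · exact hle y h z (List.mem_cons.2 (Or.inr hz))
            · have hyb : y = b := by simpa using h
              subst hyb
              rcases List.mem_cons.1 hz with h | h
              · exact le_of_eq h.symm
              · exact (List.pairwise_cons.1 hs').1 z h
          obtain ⟨hp, hm⟩ := ih (acc ++ [b]) hs' hacc' hle'
          refine ⟨hp, fun x => ?_⟩
          rw [hm]
          simp only [List.mem_append, List.mem_singleton]
          constructor
          · rintro ((h | rfl) | h)
            · exact Or.inl h
            · refine Or.inr ?_
              rw [← heq]
              simp [List.count_cons_self]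
            · refine Or.inr ?_
              by_cases hxb : x = b
              · subst hxb
                rw [← heq]
                simp [List.count_cons_self]
              · rw [count_cons_ne x a _ (heq ▸ hxb)]
                omega
          · rintro (h | h)
            · exact Or.inl (Or.inl h)
            · by_cases hxb : x = b
              · exact Or.inl (Or.inr hxb)
              · refine Or.inr ?_
                rw [count_cons_ne x a _ (heq ▸ hxb)] at h
                omega
        · -- skip: b was just emitted (b is acc's last element, so b ∈ acc)
          rw [if_neg (by rintro ⟨_, h⟩; exact hbranch h)]
          have hne : acc ≠ [] := fun h => hbranch (Or.inl h)
          have hlq : acc.getLast? = some b := by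
            by_contra h
            exact hbranch (Or.inr h)
          have hmem : b ∈ acc := by
            have hgl : acc.getLast hne = b := by
              have := List.getLast?_eq_some_getLast hne
              rw [hlq] at this
              exact (Option.some_inj.1 this).symm
            exact hgl ▸ List.getLast_mem hne
          have hle' : ∀ y ∈ acc, ∀ z ∈ b :: t', y ≤ z :=
            fun y hy z hz => hle y hy z (List.mem_cons.2 (Or.inr hz))
          obtain ⟨hp, hm⟩ := ih acc hs' hacc hle'
          refine ⟨hp, fun x => ?_⟩
          rw [hm]
          constructor
          · rintro (h | h)
            · exact Or.inl h
            · refine Or.inr ?_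
              by_cases hxb : x = b
              · subst hxb
                rw [← heq]
                simp [List.count_cons_self]
              · rw [count_cons_ne x a _ (heq ▸ hxb)]
                omega
          · rintro (h | h)
            · exact Or.inl h
            · by_cases hxb : x = b
              · exact Or.inl (hxb ▸ hmem)
              · refine Or.inr ?_
                rw [count_cons_ne x a _ (heq ▸ hxb)] at h
                omega
      · -- a < b: a occurs exactly once in the sorted list, so nothing is emitted here
        rw [if_neg (by rintro ⟨h, _⟩; exact heq h)]
        have halb : a < b := lt_of_le_of_ne hab heq
        have hnota : (b :: t').count a = 0 := by
          rw [List.count_eq_zero]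
          intro hmem
          rcases List.mem_cons.1 hmem with h | h
          · exact heq h.symm.symm
          · exact absurd rfl
              (ne_of_lt (lt_of_lt_of_le halb ((List.pairwise_cons.1 hs').1 a h)))
        have hle' : ∀ y ∈ acc, ∀ z ∈ b :: t', y ≤ z :=
          fun y hy z hz => hle y hy z (List.mem_cons.2 (Or.inr hz))
        obtain ⟨hp, hm⟩ := ih acc hs' hacc hle'
        refine ⟨hp, fun x => ?_⟩
        rw [hm]
        constructor
        · rintro (h | h)
          · exact Or.inl h
          · refine Or.inr ?_
            by_cases hxa : x = a
            · subst hxa; omega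
            · rw [count_cons_ne x a _ hxa]
              omega
        · rintro (h | h)
          · exact Or.inl h
          · by_cases hxa : x = a
            · exfalso
              subst hxa
              rw [List.count_cons_self] at h
              omega
            · refine Or.inr ?_
              rw [count_cons_ne x a _ hxa] at h
              omega

theorem find_duplicate_values_py_spec : Claim_equal_find_duplicate_values_py := by
  intro values _
  simp only [Spec_find_duplicate_values_py, find_duplicate_values_py, find_duplicate_values_py_alt]
  have hslice : PySem.List.slice (PySem.List.sorted values (fun x => x) false) (some 1) none
      = (PySem.List.sorted values (fun x => x) false).tail := by
    have := PySem.List.slice_from_natCast (PySem.List.sorted values (fun x => x) false) 1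
    simpa [List.drop_one] using this
  rw [hslice]
  set s := PySem.List.sorted values (fun x => x) false with hsdef
  have hsp : s.Pairwise (· ≤ ·) := PySem.List.sorted_pairwise values (fun x => x) 
  obtain ⟨hBp, hBm⟩ := loopB s [] hsp (by simp) (by simp)
  set L := (s.zip s.tail).foldl
      (fun (out : List String) pc =>
        if pc.1 = pc.2 ∧ (out = [] ∨ out.getLast? ≠ some pc.2) then out ++ [pc.2] else out)
      [] with hLdef
  have hscount : ∀ x, s.count x = values.count x := fun x =>
    (PySem.List.sorted_perm values (fun x => x) false).count_eq x
  -- A's duplicated set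
  set S := (values.foldl
      (fun (sd : PySem.Set String × PySem.Set String) v =>
        (PySem.Set.add sd.1 v,
         if PySem.Set.contains sd.1 v then PySem.Set.add sd.2 v else sd.2))
      (PySem.Set.empty, PySem.Set.empty)).2 with hSdef
  have hSm : ∀ x, x ∈ S ↔ 2 ≤ values.count x := by
    intro x
    rw [hSdef]
    have := loopA_mem values PySem.Set.empty PySem.Set.empty x
    simpa [PySem.Set.empty] using this
  have hSnd : S.Nodup := loopA_nodup values _ _ (by simp [PySem.Set.empty])
  have hLnd : L.Nodup := hBp.imp (fun h => ne_of_lt h)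
  have hperm : L.Perm S := by
    apply (List.perm_ext_iff_of_nodup hLnd hSnd).2
    intro x
    rw [hSm x, hBm x, hscount x]
    simp
  exact PySem.List.sorted_eq_of_perm_of_pairwise_lt S L (fun x => x) hperm hBp
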